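-- pv_equiv track=rewrite | github.com/alvarado-transfer-pathways-2026/transfer-agreements-analysis | pathway_generator/pathway_generator.py | _select_calculus_sequence
-- ===== SOURCE A (Python) =====
-- from typing import Dict, List, Set, Tuple, Optional, Any
--
-- def _select_calculus_sequence(calculus_courses: List[Tuple], completed_courses: Set[str]) -> Dict:
--     """
--     Select appropriate calculus sequence, avoiding duplicates.
--
--     Args:
--         calculus_courses: Available calculus courses
--         completed_courses: Already completed courses
--
--     Returns:
--         Selected calculus courses
--     """
--     if not calculus_courses:
--         return {}
--
--     selected = {}
--
--     # Group by level (1A, 1B, 1C, etc.)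
--     calc_by_level = {}
--     for course_code, course_data in calculus_courses:
--         # Extract level from course code or name
--         if "1A" in course_code or "I" in course_data.get("courseName", ""):
--             level = "1A"
--         elif "1B" in course_code or "II" in course_data.get("courseName", ""):
--             level = "1B"
--         elif "1C" in course_code or "III" in course_data.get("courseName", ""):
--             level = "1C"
--         elif "1D" in course_code or "IV" in course_data.get("courseName", ""):
--             level = "1D"
--         else:
--             level = "other"
--
--         if level not in calc_by_level:
--             calc_by_level[level] = []
--         calc_by_level[level].append((course_code, course_data))
--
--     # Select one course per level, preferring regular over honors
--     for level in ["1A", "1B", "1C", "1D"]: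
--         if level in calc_by_level:
--             courses_at_level = calc_by_level[level]
--
--             # Prefer regular over honors (no "H" in course code)
--             regular_courses = [c for c in courses_at_level if "H" not in c[0]]
--             if regular_courses:
--                 selected[regular_courses[0][0]] = regular_courses[0][1]
--             else:
--                 selected[courses_at_level[0][0]] = courses_at_level[0][1]
--
--             # Only include 3-4 calculus courses maximum
--             if len(selected) >= 3:
--                 break
--
--     return selected
-- ===== SOURCE B (Python) =====
-- from typing import Dict, List, Set, Tuple
--
--
-- def _classify(course_code, course_data) -> str:
--     """Same classification chain as the original, factored out."""
--     name = course_data.get("courseName", "")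
--     if "1A" in course_code or "I" in name:
--         return "1A"
--     elif "1B" in course_code or "II" in name:
--         return "1B"
--     elif "1C" in course_code or "III" in name:
--         return "1C"
--     elif "1D" in course_code or "IV" in name:
--         return "1D"
--     return "other"
--
--
-- def _pick_at_level(calculus_courses, level):
--     """One pass: first course at this level, and first regular (no 'H') one."""
--     first = None
--     first_regular = None
--     for course_code, course_data in calculus_courses:
--         if _classify(course_code, course_data) != level:
--             continue
--         if first is None:
--             first = (course_code, course_data)
--         if first_regular is None and "H" not in course_code:
--             first_regular = (course_code, course_data)
--     return first_regular if first_regular is not None else first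
--
--
-- def _select_calculus_sequence(calculus_courses: List[Tuple], completed_courses: Set[str]) -> Dict:
--     selected = {}
--     for level in ["1A", "1B", "1C", "1D"]:
--         pick = _pick_at_level(calculus_courses, level)
--         if pick is not None:
--             selected[pick[0]] = pick[1]
--             if len(selected) >= 3:
--                 break
--     return selected
-- ===== Notes on version B (the rewrite author's own statement) =====
-- stated objective: alternative
-- what changed: B drops A's intermediate group-by-level dict entirely: for each level in the fixed order it makes one scan over the course list tracking the first matching course and the first regular (non-'H') matching course, picking between them directly.
import Mathlib
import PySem

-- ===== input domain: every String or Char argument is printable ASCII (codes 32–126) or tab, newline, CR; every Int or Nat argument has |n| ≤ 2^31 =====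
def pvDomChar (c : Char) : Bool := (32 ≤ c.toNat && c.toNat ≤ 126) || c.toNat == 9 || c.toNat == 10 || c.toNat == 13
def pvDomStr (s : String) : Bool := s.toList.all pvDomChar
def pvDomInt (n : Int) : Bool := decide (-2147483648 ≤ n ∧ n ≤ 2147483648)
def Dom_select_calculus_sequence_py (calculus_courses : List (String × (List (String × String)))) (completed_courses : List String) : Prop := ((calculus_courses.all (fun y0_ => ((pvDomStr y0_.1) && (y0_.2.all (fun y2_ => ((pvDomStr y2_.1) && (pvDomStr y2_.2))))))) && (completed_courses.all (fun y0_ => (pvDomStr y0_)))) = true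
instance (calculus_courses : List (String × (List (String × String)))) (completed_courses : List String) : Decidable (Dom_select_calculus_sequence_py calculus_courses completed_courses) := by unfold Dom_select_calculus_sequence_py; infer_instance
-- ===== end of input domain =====

-- B replaces A's intermediate group-by-level dict with one direct scan per level (alternative decomposition, same cost).

-- ===== PORT A =====
-- Transliteration of _select_calculus_sequence: group courses into calc_by_level
-- (a dict level -> list, built with modify-append), then loop over the four levels
-- with a break-at-3, implemented as a fold carrying (selected, done-flag).
def select_calculus_sequence_py (calculus_courses : List (String × (List (String × String)))) (completed_courses : List String) : List (String × List (String × String)) :=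
  if calculus_courses = [] then []
  else
    let calc_by_level : PySem.Dict String (List (String × List (String × String))) :=
      calculus_courses.foldl (fun d p =>
        let level :=
          if PySem.Str.isIn "1A" p.1 || PySem.Str.isIn "I" ((PySem.Dict.mk p.2).getD "courseName" "") then "1A"
          else if PySem.Str.isIn "1B" p.1 || PySem.Str.isIn "II" ((PySem.Dict.mk p.2).getD "courseName" "") then "1B"
          else if PySem.Str.isIn "1C" p.1 || PySem.Str.isIn "III" ((PySem.Dict.mk p.2).getD "courseName" "") then "1C"
          else if PySem.Str.isIn "1D" p.1 || PySem.Str.isIn "IV" ((PySem.Dict.mk p.2).getD "courseName" "") then "1D"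
          else "other"
        d.modify level [] (· ++ [p])) PySem.Dict.empty
    let final := ["1A", "1B", "1C", "1D"].foldl
      (fun (st : PySem.Dict String (List (String × String)) × Bool) level =>
        if st.2 then st
        else
          match calc_by_level.get? level with
          | none => st
          | some courses_at_level =>
            let regular := courses_at_level.filter (fun c => !(PySem.Str.isIn "H" c.1))
            let sel :=
              match regular with
              | r :: _ => st.1.insert r.1 r.2
              | [] =>
                match courses_at_level with
                | c :: _ => st.1.insert c.1 c.2
                | [] => st.1  -- unreachable: grouped lists are built non-empty
            (sel, decide (3 ≤ sel.size)))
      (PySem.Dict.empty, false)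
    final.1.items

-- ===== PORT B =====
-- helper _classify of Source B: the same if/elif chain, factored out
def pvLevelB (course_code : String) (course_data : List (String × String)) : String :=
  let name := (PySem.Dict.mk course_data).getD "courseName" ""
  if PySem.Str.isIn "1A" course_code || PySem.Str.isIn "I" name then "1A"
  else if PySem.Str.isIn "1B" course_code || PySem.Str.isIn "II" name then "1B"
  else if PySem.Str.isIn "1C" course_code || PySem.Str.isIn "III" name then "1C"
  else if PySem.Str.isIn "1D" course_code || PySem.Str.isIn "IV" name then "1D"
  else "other"

-- helper _pick_at_level of Source B: one pass tracking (first, first_regular)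
def pvPickB (calculus_courses : List (String × List (String × String))) (level : String) :
    Option (String × List (String × String)) :=
  let acc := calculus_courses.foldl
    (fun (acc : Option (String × List (String × String)) × Option (String × List (String × String))) p =>
      if pvLevelB p.1 p.2 ≠ level then acc
      else
        let first := match acc.1 with | none => some p | some _ => acc.1
        let firstReg := match acc.2 with
          | none => if !(PySem.Str.isIn "H" p.1) then some p else none
          | some _ => acc.2
        (first, firstReg))
    (none, none)
  match acc.2 with
  | some r => some r
  | none => acc.1

-- the for-loop over the four levels with its break-at-3, as recursion on the level list
def pvGoB (calculus_courses : List (String × List (String × String))) :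
    List String → PySem.Dict String (List (String × String)) →
    PySem.Dict String (List (String × String))
  | [], sel => sel
  | level :: rest, sel =>
    match pvPickB calculus_courses level with
    | none => pvGoB calculus_courses rest sel
    | some p =>
      let sel' := sel.insert p.1 p.2
      if 3 ≤ sel'.size then sel' else pvGoB calculus_courses rest sel'

def select_calculus_sequence_py_alt (calculus_courses : List (String × (List (String × String)))) (completed_courses : List String) : List (String × List (String × String)) :=
  (pvGoB calculus_courses ["1A", "1B", "1C", "1D"] PySem.Dict.empty).items

-- ===== PRECONDITION & SPEC =====
def Spec_select_calculus_sequence_py (calculus_courses : List (String × (List (String × String)))) (completed_courses : List String) (out : List (String × List (String × String))) : Prop := out = select_calculus_sequence_py_alt calculus_courses completed_courses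
instance (calculus_courses : List (String × (List (String × String)))) (completed_courses : List String) (out : List (String × List (String × String))) : Decidable (Spec_select_calculus_sequence_py calculus_courses completed_courses out) := by unfold Spec_select_calculus_sequence_py; infer_instance

-- ===== CLAIM (what is proved, stated in full; the proofs are below) =====
def Claim_equal_select_calculus_sequence_py : Prop := ∀ (calculus_courses : List (String × (List (String × String)))) (completed_courses : List String), Dom_select_calculus_sequence_py calculus_courses completed_courses → Spec_select_calculus_sequence_py calculus_courses completed_courses (select_calculus_sequence_py calculus_courses completed_courses)

-- ===== LEMMAS AND PROOFS =====

def pvFl (cs : List (String × List (String × String))) (L : String) :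
    List (String × List (String × String)) :=
  cs.filter (fun p => pvLevelB p.1 p.2 == L)
lemma pickAux (noH : (String × List (String × String)) → Bool)
    (l : List (String × List (String × String))) (a b : Option (String × List (String × String))) :
    l.foldl (fun (acc : Option (String × List (String × String)) × Option (String × List (String × String))) p =>
        (match acc.1 with | none => some p | some _ => acc.1,
         match acc.2 with
          | none => if noH p then some p else none
          | some _ => acc.2)) (a, b)
    = (a.or l.head?, b.or ((l.filter noH).head?)) := by
  induction l generalizing a b with
  | nil => simp
  | cons p t ih =>
    rw [List.foldl_cons, ih]
    cases a <;> cases b <;> cases h : noH p <;> simp [h, Option.or]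
lemma pvPickB_eq (cs : List (String × List (String × String))) (L : String) :
    pvPickB cs L =
      match (pvFl cs L).filter (fun c => !(PySem.Str.isIn "H" c.1)) with
      | r :: _ => some r
      | [] => (pvFl cs L).head? := by
  unfold pvPickB
  simp only [ne_eq, ite_not]
  rw [PySem.List.foldl_ite_eq_foldl_filter]
  have hfl : cs.filter (fun p => decide (pvLevelB p.1 p.2 = L)) = pvFl cs L := by
    unfold pvFl
    apply List.filter_congr
    intro x _
    by_cases hx : pvLevelB x.1 x.2 = L <;> simp [hx]
  rw [hfl]
  rw [pickAux (fun c => !(PySem.Str.isIn "H" c.1)) (pvFl cs L) none none]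
  cases h : (pvFl cs L).filter (fun c => !(PySem.Str.isIn "H" c.1)) with
  | nil => simp [Option.or]
  | cons r t => simp [Option.or]
lemma pvGroup_getD (cs : List (String × List (String × String))) (L : String) :
    (cs.foldl (fun (d : PySem.Dict String (List (String × List (String × String)))) p =>
        d.modify (pvLevelB p.1 p.2) [] (· ++ [p])) PySem.Dict.empty).getD L []
    = pvFl cs L := by
  have key : cs.foldl (fun (d : PySem.Dict String (List (String × List (String × String)))) p =>
        d.modify (pvLevelB p.1 p.2) [] (· ++ [p])) PySem.Dict.empty
      = (cs.map (fun p => (pvLevelB p.1 p.2, p))).foldl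
          (fun (d : PySem.Dict String (List (String × List (String × String)))) q => d.modify q.1 [] (· ++ [q.2]))
          PySem.Dict.empty :=
    by exact (List.foldl_map (f := fun p : String × List (String × String) => (pvLevelB p.1 p.2, p))
      (g := fun (d : PySem.Dict String (List (String × List (String × String)))) q => d.modify q.1 [] (· ++ [q.2]))).symm
  rw [key, PySem.Dict.getD_foldl_modify_append]
  rw [List.filter_map]
  unfold pvFl
  simp [Function.comp_def]
lemma pvGroup_get? (cs : List (String × List (String × String))) (L : String) :
    (cs.foldl (fun (d : PySem.Dict String (List (String × List (String × String)))) p =>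
        d.modify (pvLevelB p.1 p.2) [] (· ++ [p])) PySem.Dict.empty).get? L
    = if pvFl cs L = [] then none else some (pvFl cs L) := by
  have hkeys : L ∈ (cs.foldl (fun (d : PySem.Dict String (List (String × List (String × String)))) p =>
        d.modify (pvLevelB p.1 p.2) [] (· ++ [p])) PySem.Dict.empty).keys ↔ L ∈ cs.map (fun p => pvLevelB p.1 p.2) := by
    rw [PySem.Dict.keys_foldl_modify_key]
    rw [PySem.Set.mem_update]
    simp [PySem.Dict.keys_empty]
  have hmemfl : pvFl cs L = [] ↔ L ∉ cs.map (fun p => pvLevelB p.1 p.2) := by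
    unfold pvFl
    rw [List.filter_eq_nil_iff]
    simp
  by_cases hfl : pvFl cs L = []
  · rw [if_pos hfl]
    rw [PySem.Dict.get?_eq_none_iff_contains]
    rw [← Bool.not_eq_true, PySem.Dict.contains_iff_mem_keys, hkeys]
    exact hmemfl.mp hfl
  · rw [if_neg hfl]
    have hcon : (cs.foldl (fun (d : PySem.Dict String (List (String × List (String × String)))) p =>
        d.modify (pvLevelB p.1 p.2) [] (· ++ [p])) PySem.Dict.empty).contains L = true := by
      rw [PySem.Dict.contains_iff_mem_keys, hkeys]
      by_contra hn
      exact hfl (hmemfl.mpr hn)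
    have hs := PySem.Dict.contains_eq_isSome_get? (d := (cs.foldl (fun (d : PySem.Dict String (List (String × List (String × String)))) p =>
        d.modify (pvLevelB p.1 p.2) [] (· ++ [p])) PySem.Dict.empty)) (k := L)
    rw [hcon] at hs
    cases hg : (cs.foldl (fun (d : PySem.Dict String (List (String × List (String × String)))) p =>
        d.modify (pvLevelB p.1 p.2) [] (· ++ [p])) PySem.Dict.empty).get? L with
    | none => rw [hg] at hs; simp at hs
    | some v =>
      have := pvGroup_getD cs L
      rw [PySem.Dict.getD_eq_get?_getD, hg] at this
      simpa using this
def pvF (g : PySem.Dict String (List (String × List (String × String))))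
    (st : PySem.Dict String (List (String × String)) × Bool) (level : String) :
    PySem.Dict String (List (String × String)) × Bool :=
  if st.2 then st
  else
    match g.get? level with
    | none => st
    | some courses_at_level =>
      let regular := courses_at_level.filter (fun c => !(PySem.Str.isIn "H" c.1))
      let sel :=
        match regular with
        | r :: _ => st.1.insert r.1 r.2
        | [] =>
          match courses_at_level with
          | c :: _ => st.1.insert c.1 c.2
          | [] => st.1
      (sel, decide (3 ≤ sel.size))
lemma pvFlagAbsorb (g : PySem.Dict String (List (String × List (String × String))))
    (levels : List String) (s : PySem.Dict String (List (String × String))) :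
    levels.foldl (pvF g) (s, true) = (s, true) := by
  induction levels with
  | nil => rfl
  | cons L rest ih => rw [List.foldl_cons]; exact ih
lemma pvLoopEq (cs : List (String × List (String × String)))
    (g : PySem.Dict String (List (String × List (String × String))))
    (hg : ∀ L, g.get? L = if pvFl cs L = [] then none else some (pvFl cs L)) :
    ∀ (levels : List String) (sel : PySem.Dict String (List (String × String))),
    (levels.foldl (pvF g) (sel, false)).1 = pvGoB cs levels sel := by
  intro levels
  induction levels with
  | nil => intro sel; rfl
  | cons L rest ih =>
    intro sel
    rw [List.foldl_cons]
    by_cases hfl : pvFl cs L = []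
    · have hstep : pvF g (sel, false) L = (sel, false) := by
        simp [pvF, hg L, hfl]
      have hpick : pvPickB cs L = none := by
        rw [pvPickB_eq, hfl]
        simp
      rw [hstep, ih sel, pvGoB, hpick]
    · obtain ⟨q, t, hq⟩ : ∃ q t, pvFl cs L = q :: t := by
        cases h : pvFl cs L with
        | nil => exact absurd h hfl
        | cons q t => exact ⟨q, t, rfl⟩
      -- the picked course, shared by both programs
      cases hreg : (pvFl cs L).filter (fun c => !(PySem.Str.isIn "H" c.1)) with
      | cons r rt =>
        have hstep : pvF g (sel, false) L = (sel.insert r.1 r.2, decide (3 ≤ (sel.insert r.1 r.2).size)) := by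
          unfold pvF
          rw [hg L, if_neg hfl]
          generalize hP : (fun c : String × List (String × String) => !PySem.Str.isIn "H" c.1) = P
          rw [hP] at hreg
          simp [hreg]
        have hpick : pvPickB cs L = some r := by
          rw [pvPickB_eq, hreg]
        rw [hstep, pvGoB, hpick]
        by_cases h3 : 3 ≤ (sel.insert r.1 r.2).size
        · simp only [h3, decide_true]
          rw [pvFlagAbsorb]
          simp
        · simp only [h3, decide_false]
          rw [ih]
          simp
      | nil =>
        have hstep : pvF g (sel, false) L = (sel.insert q.1 q.2, decide (3 ≤ (sel.insert q.1 q.2).size)) := by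
          unfold pvF
          rw [hg L, if_neg hfl]
          generalize hP : (fun c : String × List (String × String) => !PySem.Str.isIn "H" c.1) = P
          rw [hP] at hreg
          rw [hq] at hreg
          simp [hq, hreg]
        have hpick : pvPickB cs L = some q := by
          rw [pvPickB_eq, hreg, hq]
          rfl
        rw [hstep, pvGoB, hpick]
        by_cases h3 : 3 ≤ (sel.insert q.1 q.2).size
        · simp only [h3, decide_true]
          rw [pvFlagAbsorb]
          simp
        · simp only [h3, decide_false]
          rw [ih]
          simp

-- ===== VERDICT (by name: the statement is the Claim_ definition above) =====
theorem select_calculus_sequence_py_spec : Claim_equal_select_calculus_sequence_py := by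
  intro cs comp _
  unfold Spec_select_calculus_sequence_py
  unfold select_calculus_sequence_py select_calculus_sequence_py_alt
  by_cases hcs : cs = []
  · subst hcs; rfl
  · rw [if_neg hcs]
    exact congrArg PySem.Dict.items
      (pvLoopEq cs _ (pvGroup_get? cs) ["1A", "1B", "1C", "1D"] PySem.Dict.empty)
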